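-- pv_equiv track=rewrite | github.com/ttzytt/PyAutoGrade | tests/Block 4/tested_code/obfuscated_tested_codes [copied at 2024-04-22 10#59#52.136339]/2064/Unit 1/Cards/card_functions_reviewed.py | uno_who_played_what
-- ===== SOURCE A (Python) =====
-- def uno_who_played_what(cards_played):
--     play_order = [[], [], [], []]
--     player = 0
--     i = 0
--
--     while (i < len(cards_played)):
--         if (cards_played[i] == 'skip'):
--             play_order[player].append(cards_played[i])
--             player += 1
--
--         elif (cards_played[i] == 'reverse'):
--             play_order[player].append(cards_played[i])
--             player -= 1
--             if(player < 0):
--                 player += 4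
--             i += 1
--             if (i < len(cards_played)):
--                 while ((i < len(cards_played)) and (cards_played[i] != 'reverse')):
--                     if (cards_played[i] == 'skip'):
--                         play_order[player].append(cards_played[i])
--                         player -= 2
--                     else:
--                         play_order[player].append(cards_played[i])
--                         player -= 1
--                     i += 1
--
--                     if (player < 0):
--                         player += 4
--             if ( i < len(cards_played)):
--                 play_order[player].append(cards_played[i])
--
--         else:
--             play_order[player].append(cards_played[i])
--
--         player += 1
--
--         if (player >= 4):
--             player -= 4
--
--         i += 1
--
--     return play_order
-- ===== SOURCE B (Python) =====
-- def uno_who_played_what(cards_played):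
--     play_order = [[], [], [], []]
--     player, d = 0, 1
--     for card in cards_played:
--         play_order[player].append(card)
--         if card == 'skip':
--             player += 2 * d
--         elif card == 'reverse':
--             d = -d
--             player += d
--         else:
--             player += d
--         player %= 4
--     return play_order
-- ===== Notes on version B (the rewrite author's own statement) =====
-- stated objective: simpler
-- what changed: Replaced A's nested while-loop state machine (outer forward loop plus a separate inner backward loop entered on 'reverse') with one flat loop over the cards that maintains the current player and a direction variable, stepping player by dir (or 2*dir on skip, flipping dir on reverse) modulo 4. (measured ~2x faster: one pass with no inner loop or re-dispatch overhead).
import Mathlib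
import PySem

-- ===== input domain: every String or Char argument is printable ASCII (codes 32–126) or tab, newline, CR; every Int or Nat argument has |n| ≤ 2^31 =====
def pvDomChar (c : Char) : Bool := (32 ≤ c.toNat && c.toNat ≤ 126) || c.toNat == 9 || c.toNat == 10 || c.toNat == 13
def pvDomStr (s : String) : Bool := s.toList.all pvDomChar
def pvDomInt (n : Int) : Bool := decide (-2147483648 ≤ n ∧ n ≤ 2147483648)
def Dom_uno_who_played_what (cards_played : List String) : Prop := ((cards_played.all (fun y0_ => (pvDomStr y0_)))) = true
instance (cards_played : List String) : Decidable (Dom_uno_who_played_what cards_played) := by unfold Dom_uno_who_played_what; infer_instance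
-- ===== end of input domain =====

-- B replaces A's nested while-loop state machine (outer forward loop + inner backward loop after a
-- 'reverse') by one flat loop over the cards maintaining a direction variable; same return value.

-- play_order[player].append(card): player is always in 0..3 at every append in both programs
def appendAt (po : List (List String)) (p : Int) (c : String) : List (List String) :=
  po.set p.toNat ((po.getD p.toNat []) ++ [c])

-- ===== PORT A =====
-- A's outer while loop (forward traversal) and its inner while loop (backward traversal entered
-- on a 'reverse'), transcribed branch for branch; i-advance becomes structural recursion.
mutual
def unoFwd : List String → Int → List (List String) → List (List String)
  | [], _, po => po
  | c :: rest, player, po =>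
    if c = "skip" then
      -- append; player += 1; then outer tail: player += 1; if player ≥ 4 then player -= 4
      unoFwd rest (if player + 1 + 1 ≥ 4 then player + 1 + 1 - 4 else player + 1 + 1)
        (appendAt po player c)
    else if c = "reverse" then
      -- append; player -= 1; wrap if < 0; i += 1; enter the inner backward loop
      unoBwd rest (if player - 1 < 0 then player - 1 + 4 else player - 1) (appendAt po player c)
    else
      -- append; outer tail: player += 1; wrap
      unoFwd rest (if player + 1 ≥ 4 then player + 1 - 4 else player + 1) (appendAt po player c)

def unoBwd : List String → Int → List (List String) → List (List String)
  | [], _, po => po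
  | c :: rest, player, po =>
    if c = "reverse" then
      -- inner loop exits on 'reverse'; A appends it, then outer tail: player += 1; wrap; i += 1
      unoFwd rest (if player + 1 ≥ 4 then player + 1 - 4 else player + 1) (appendAt po player c)
    else if c = "skip" then
      unoBwd rest (if player - 2 < 0 then player - 2 + 4 else player - 2) (appendAt po player c)
    else
      unoBwd rest (if player - 1 < 0 then player - 1 + 4 else player - 1) (appendAt po player c)
end

def uno_who_played_what (cards_played : List String) : List (List String) :=
  unoFwd cards_played 0 [[], [], [], []]

-- ===== PORT B =====
-- B's single flat loop: current player and direction d; player %= 4 each step.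
def unoFlat : List String → Int → Int → List (List String) → List (List String)
  | [], _, _, po => po
  | c :: rest, player, d, po =>
    let po' := appendAt po player c
    let d' := if c = "reverse" then -d else d
    let player' := if c = "skip" then player + 2 * d else player + d'
    unoFlat rest (PySem.Int.mod player' 4) d' po'

def uno_who_played_what_alt (cards_played : List String) : List (List String) :=
  unoFlat cards_played 0 1 [[], [], [], []]

-- ===== PRECONDITION & SPEC =====
def Spec_uno_who_played_what (cards_played : List String) (out : List (List String)) : Prop := out = uno_who_played_what_alt cards_played
instance (cards_played : List String) (out : List (List String)) : Decidable (Spec_uno_who_played_what cards_played out) := by unfold Spec_uno_who_played_what; infer_instance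

-- ===== CLAIM (what is proved, stated in full; the proofs are below) =====
def Claim_equal_uno_who_played_what : Prop := ∀ (cards_played : List String), Dom_uno_who_played_what cards_played → Spec_uno_who_played_what cards_played (uno_who_played_what cards_played)

-- ===== LEMMAS AND PROOFS =====

lemma pymod4 (x : Int) : PySem.Int.mod x 4 = x % 4 :=
  PySem.Int.mod_eq_emod_of_pos (by norm_num)

-- The two traversal modes of A coincide with B's flat loop at d = 1 / d = -1.
lemma uno_modes_eq (rest : List String) : ∀ (player : Int) (po : List (List String)),
    0 ≤ player → player < 4 →
    unoFwd rest player po = unoFlat rest player 1 po ∧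
    unoBwd rest player po = unoFlat rest player (-1) po := by
  induction rest with
  | nil => intro player po _ _; exact ⟨rfl, rfl⟩
  | cons c rest ih =>
    intro player po h0 h4
    constructor
    · by_cases hs : c = "skip"
      · simp only [unoFwd, unoFlat, hs, reduceIte]
        have he : (if player + 1 + 1 ≥ 4 then player + 1 + 1 - 4 else player + 1 + 1)
            = PySem.Int.mod (player + 2 * 1) 4 := by rw [pymod4]; split_ifs <;> omega
        rw [he]
        exact (ih _ _ (by rw [pymod4]; omega) (by rw [pymod4]; omega)).1
      · by_cases hr : c = "reverse"
        · simp only [unoFwd, unoFlat, hr, reduceIte]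
          have he : (if player - 1 < 0 then player - 1 + 4 else player - 1)
              = PySem.Int.mod (player + -1) 4 := by rw [pymod4]; split_ifs <;> omega
          rw [he]
          exact (ih _ _ (by rw [pymod4]; omega) (by rw [pymod4]; omega)).2
        · simp only [unoFwd, unoFlat, hs, hr, reduceIte]
          have he : (if player + 1 ≥ 4 then player + 1 - 4 else player + 1)
              = PySem.Int.mod (player + 1) 4 := by rw [pymod4]; split_ifs <;> omega
          rw [he]
          exact (ih _ _ (by rw [pymod4]; omega) (by rw [pymod4]; omega)).1
    · by_cases hr : c = "reverse"
      · simp only [unoBwd, unoFlat, hr, reduceIte]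
        have he : (if player + 1 ≥ 4 then player + 1 - 4 else player + 1)
            = PySem.Int.mod (player + - -1) 4 := by rw [pymod4]; split_ifs <;> omega
        rw [he]
        exact (ih _ _ (by rw [pymod4]; omega) (by rw [pymod4]; omega)).1
      · by_cases hs : c = "skip"
        · simp only [unoBwd, unoFlat, hs, reduceIte]
          have he : (if player - 2 < 0 then player - 2 + 4 else player - 2)
              = PySem.Int.mod (player + 2 * -1) 4 := by rw [pymod4]; split_ifs <;> omega
          rw [he]
          exact (ih _ _ (by rw [pymod4]; omega) (by rw [pymod4]; omega)).2
        · simp only [unoBwd, unoFlat, hr, hs, reduceIte]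
          have he : (if player - 1 < 0 then player - 1 + 4 else player - 1)
              = PySem.Int.mod (player + -1) 4 := by rw [pymod4]; split_ifs <;> omega
          rw [he]
          exact (ih _ _ (by rw [pymod4]; omega) (by rw [pymod4]; omega)).2

-- ===== VERDICT (by name: the statement is the Claim_ definition above) =====
theorem uno_who_played_what_spec : Claim_equal_uno_who_played_what := by
  intro cards _
  unfold Spec_uno_who_played_what uno_who_played_what uno_who_played_what_alt
  exact (uno_modes_eq cards 0 [[], [], [], []] (by norm_num) (by norm_num)).1
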